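-- pv_equiv track=rewrite | github.com/LemonWei111/priv.Lemon_BUPT | 2024/NLP/BERT中文词性标注/load_data.py | find_min_length
-- ===== SOURCE A (Python) =====
-- def find_min_length(sequences):
--     # 假设sequences是一个列表，其中包含多个列表
--     min_length = 10000
--     for seq in sequences:
--         if type(seq) is not list:
--             min_length = len(sequences)
--             break
--         min_length = min(min_length, len(seq))
--     return min_length
-- ===== SOURCE B (Python) =====
-- def find_min_length(sequences):
--     if any(type(seq) is not list for seq in sequences):
--         return len(sequences)
--     return min([10000] + [len(seq) for seq in sequences])
-- ===== Notes on version B (the rewrite author's own statement) =====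
-- stated objective: simpler
-- what changed: Replaces A's single loop interleaving type-check, early break and a running min with a guard pass (any) followed by one built-in min over [10000]+lengths.
import Mathlib
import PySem

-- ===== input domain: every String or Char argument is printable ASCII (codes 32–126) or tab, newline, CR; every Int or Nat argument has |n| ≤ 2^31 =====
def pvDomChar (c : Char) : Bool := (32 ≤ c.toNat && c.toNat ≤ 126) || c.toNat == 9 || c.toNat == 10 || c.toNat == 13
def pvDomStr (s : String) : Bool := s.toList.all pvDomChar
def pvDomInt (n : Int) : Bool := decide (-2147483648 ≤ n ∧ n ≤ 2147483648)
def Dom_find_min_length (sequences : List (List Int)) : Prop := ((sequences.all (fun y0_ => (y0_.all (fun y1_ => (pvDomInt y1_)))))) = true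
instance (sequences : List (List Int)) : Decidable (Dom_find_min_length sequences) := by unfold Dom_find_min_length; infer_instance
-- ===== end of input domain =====

-- B: guard pass then one built-in min over [10000]+lengths, instead of A's running-min loop; equal return value on all inputs.
-- ===== PORT A =====
-- A: running min starting at 10000 over the element lengths (the 'type(seq) is not list' branch
-- can never fire under the List (List Int) type, so it has no Lean counterpart).
def find_min_length (sequences : List (List Int)) : Int :=
  sequences.foldl (fun min_length seq => min min_length (seq.length : Int)) 10000

-- ===== PORT B =====
-- the any(...) guard of Source B is always False under the List (List Int) type; min([10000]+lens) via PySem.List.min?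
def find_min_length_alt (sequences : List (List Int)) : Int :=
  match PySem.List.min? ((10000 : Int) :: sequences.map (fun seq => (seq.length : Int))) (fun x => x) with
  | some m => m
  | none => 0

-- ===== PRECONDITION & SPEC =====
def Spec_find_min_length (sequences : List (List Int)) (out : Int) : Prop := out = find_min_length_alt sequences
instance (sequences : List (List Int)) (out : Int) : Decidable (Spec_find_min_length sequences out) := by unfold Spec_find_min_length; infer_instance

-- ===== CLAIM (what is proved, stated in full; the proofs are below) =====
def Claim_equal_find_min_length : Prop := ∀ (sequences : List (List Int)), Dom_find_min_length sequences → Spec_find_min_length sequences (find_min_length sequences)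

-- ===== LEMMAS AND PROOFS =====

-- ===== VERDICT (by name: the statement is the Claim_ definition above) =====
theorem find_min_length_spec : Claim_equal_find_min_length := by
  intro sequences _
  unfold Spec_find_min_length find_min_length find_min_length_alt
  rw [PySem.List.min?_id_cons, List.foldl_map]
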